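-- pv_equiv track=rewrite | github.com/Nikita-Filonov/demo_auto_tests | utils/ui/utils.py | normalized_grades
-- ===== SOURCE A (Python) =====
-- from typing import List, Dict, Union
--
-- def normalized_grades(grades: List[Dict]):
--     """
--     Based on
--     normalizedGrades() {
--         const sortedGrades: IGrade[] = [...this.grades].sort((a, b) => b.max - a.max);
--
--         return sortedGrades.map((g, i) => {
--             const nextMaxScore = sortedGrades[i + 1]?.max ?? -1;
--
--             return { ...g, min: nextMaxScore + 1 };
--         });
--     }
--     :return:
--     """
--     sorted_grades = sorted(grades, key=lambda g: g['max'], reverse=True)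
--
--     return [
--         {
--             **grade,
--             'min': (-1 if (len(grades) <= index + 1) else sorted_grades[index + 1]['max']) + 1
--         }
--         for index, grade in enumerate(sorted_grades)
--     ]
-- ===== SOURCE B (Python) =====
-- def normalized_grades(grades):
--     # Build the result back-to-front: walk the sorted list in reverse and thread
--     # the running 'min' (0 for the last grade, then previous max + 1) through an
--     # accumulator, so no index arithmetic or lookahead is needed.
--     out = []
--     nxt = 0
--     for g in reversed(sorted(grades, key=lambda g: g['max'], reverse=True)):
--         out.append({**g, 'min': nxt})
--         nxt = g['max'] + 1
--     out.reverse()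
--     return out
-- ===== Notes on version B (the rewrite author's own statement) =====
-- stated objective: alternative
-- what changed: Replaced the enumerate comprehension that looks ahead at sorted_grades[index+1] by a back-to-front construction: traverse the sorted list in reverse threading the running 'min' (0, then previous max+1) through an accumulator, then reverse the output, eliminating all index arithmetic and the len(grades) boundary test.
import Mathlib
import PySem

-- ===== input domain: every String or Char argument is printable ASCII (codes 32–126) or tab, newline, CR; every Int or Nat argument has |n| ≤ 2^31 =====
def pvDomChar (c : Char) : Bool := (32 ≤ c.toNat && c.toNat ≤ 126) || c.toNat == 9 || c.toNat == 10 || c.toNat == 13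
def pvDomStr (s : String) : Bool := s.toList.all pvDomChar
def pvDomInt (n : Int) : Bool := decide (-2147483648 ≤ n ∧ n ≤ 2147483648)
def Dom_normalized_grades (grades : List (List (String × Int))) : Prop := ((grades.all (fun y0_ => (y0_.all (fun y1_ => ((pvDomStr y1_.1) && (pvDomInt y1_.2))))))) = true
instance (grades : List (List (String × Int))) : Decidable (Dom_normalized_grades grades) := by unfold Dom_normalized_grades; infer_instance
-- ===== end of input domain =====

-- B builds the result back-to-front: it traverses the sorted list in reverse threading the
-- running 'min' (0, then previous max + 1) through an accumulator, replacing A's index+1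
-- look-ahead comprehension; objective: alternative decomposition, same cost.

-- ===== PORT A =====
-- g['max'] on a Python dict (assoc list viewed as a dict; first-position, last-value semantics)
def pvKeyMax (g : List (String × Int)) : Int := (PySem.Dict.ofList g).getD "max" 0

def normalized_grades (grades : List (List (String × Int))) : List (List (String × Int)) :=
  let sorted_grades := PySem.List.sorted grades (fun g => pvKeyMax g) true
  (PySem.List.enumerate sorted_grades).map (fun p =>
    ((PySem.Dict.ofList p.2).insert "min"
      ((if (grades.length : Int) ≤ p.1 + 1 then -1
        else pvKeyMax (PySem.List.pyGetD sorted_grades (p.1 + 1) [])) + 1)).items)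

-- ===== PORT B =====
def normalized_grades_alt (grades : List (List (String × Int))) : List (List (String × Int)) :=
  let s := PySem.List.sorted grades (fun g => pvKeyMax g) true
  -- 'for g in reversed(s): out.append({**g, 'min': nxt}); nxt = g['max'] + 1'
  let st := s.reverse.foldl
    (fun (st : List (List (String × Int)) × Int) g =>
      (st.1 ++ [((PySem.Dict.ofList g).insert "min" st.2).items], pvKeyMax g + 1))
    ([], 0)
  st.1.reverse

-- ===== PRECONDITION & SPEC =====
-- Pre_: every dict must carry the key 'max', otherwise Python A raises KeyError in the sort key.
def Pre_normalized_grades (grades : List (List (String × Int))) : Prop :=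
  ∀ g ∈ grades, ((PySem.Dict.ofList g).contains "max") = true
instance (grades : List (List (String × Int))) : Decidable (Pre_normalized_grades grades) := by
  unfold Pre_normalized_grades; infer_instance

def pvWitness_normalized_grades : (List (List (String × Int))) :=
  [[("max", 10), ("name", 0)], [("max", 3)], [("max", 7), ("min", 99)]]

def Spec_normalized_grades (grades : List (List (String × Int))) (out : List (List (String × Int))) : Prop := out = normalized_grades_alt grades
instance (grades : List (List (String × Int))) (out : List (List (String × Int))) : Decidable (Spec_normalized_grades grades out) := by unfold Spec_normalized_grades; infer_instance

-- ===== CLAIM (what is proved, stated in full; the proofs are below) =====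
def Claim_equal_normalized_grades : Prop := ∀ (grades : List (List (String × Int))), Dom_normalized_grades grades → Pre_normalized_grades grades → Spec_normalized_grades grades (normalized_grades grades)

-- ===== LEMMAS AND PROOFS =====

-- the list B's loop produces (before the final reversal), as a structural recursion
def pvBuild : List (List (String × Int)) → Int → List (List (String × Int))
  | [], _ => []
  | g :: rest, nxt =>
      ((PySem.Dict.ofList g).insert "min" nxt).items :: pvBuild rest (pvKeyMax g + 1)

theorem pvFoldl_eq_build (l : List (List (String × Int))) :
    ∀ (out : List (List (String × Int))) (nxt : Int),
      (l.foldl (fun (st : List (List (String × Int)) × Int) g =>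
        (st.1 ++ [((PySem.Dict.ofList g).insert "min" st.2).items], pvKeyMax g + 1))
        (out, nxt)).1 = out ++ pvBuild l nxt := by
  induction l with
  | nil => intro out nxt; simp [pvBuild]
  | cons g rest ih => intro out nxt; simp [pvBuild, ih]

theorem pvBuild_length (l : List (List (String × Int))) :
    ∀ nxt, (pvBuild l nxt).length = l.length := by
  induction l with
  | nil => intro nxt; simp [pvBuild]
  | cons g rest ih => intro nxt; simp [pvBuild, ih]

theorem pvBuild_getElem (l : List (List (String × Int))) :
    ∀ (nxt : Int) (k : Nat) (hk : k < l.length),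
      (pvBuild l nxt)[k]'(by rw [pvBuild_length]; exact hk) =
        ((PySem.Dict.ofList (l[k]'hk)).insert "min"
          (if h0 : k = 0 then nxt else pvKeyMax (l[k-1]'(by omega)) + 1)).items := by
  induction l with
  | nil => intro nxt k hk; exact absurd hk (by simp)
  | cons g rest ih =>
    intro nxt k hk
    cases k with
    | zero => simp [pvBuild]
    | succ j =>
      have hj : j < rest.length := by simpa using hk
      have hstep : (pvBuild (g :: rest) nxt)[j+1]'(by rw [pvBuild_length]; exact hk) =
          (pvBuild rest (pvKeyMax g + 1))[j]'(by rw [pvBuild_length]; exact hj) := by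
        simp [pvBuild]
      rw [hstep, ih (pvKeyMax g + 1) j hj]
      cases j with
      | zero => simp
      | succ i =>
        rw [dif_neg (by omega), dif_neg (by omega)]
        have e1 : (g :: rest)[i+1]'(by simp; omega) = rest[i]'(by omega) := by simp
        simp

theorem normalized_grades_spec : Claim_equal_normalized_grades := by
  intro grades _ _
  unfold Spec_normalized_grades normalized_grades normalized_grades_alt
  dsimp only
  rw [pvFoldl_eq_build]
  have hlen : (PySem.List.sorted grades (fun g => pvKeyMax g) true).length = grades.length :=
    PySem.List.length_sorted ..
  rw [← hlen]
  generalize PySem.List.sorted grades (fun g => pvKeyMax g) true = sg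
  simp only [List.nil_append]
  apply List.ext_getElem
  · simp [PySem.List.length_enumerate, pvBuild_length]
  · intro k hk1 hk2
    have hn : k < sg.length := by
      simpa [PySem.List.length_enumerate] using hk1
    rw [List.getElem_map, PySem.List.getElem_enumerate]
    have hrl : (pvBuild sg.reverse 0).length = sg.length := by
      rw [pvBuild_length]; simp
    have hrev : (pvBuild sg.reverse 0).reverse[k]'hk2 =
        (pvBuild sg.reverse 0)[sg.length - 1 - k]'(by rw [hrl]; omega) := by
      rw [List.getElem_reverse]
      congr 1
      omega
    rw [hrev, pvBuild_getElem sg.reverse 0 (sg.length - 1 - k)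
      (by simp; omega)]
    have hsrev : ∀ (j : Nat) (hj : j < sg.length),
        sg.reverse[j]'(by simpa using hj) = sg[sg.length - 1 - j]'(by omega) := by
      intro j hj
      rw [List.getElem_reverse]
    by_cases hlast : k + 1 < sg.length
    · -- not the last element
      have hc : ¬ ((sg.length : Int) ≤ 0 + ((k : Nat) : Int) + 1) := by omega
      rw [if_neg hc]
      rw [dif_neg (by omega : ¬ sg.length - 1 - k = 0)]
      have e0 : sg.reverse[sg.length - 1 - k]'(by simp; omega) = sg[k]'hn := by
        rw [hsrev _ (by omega)]
        congr 1
        omega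
      have e1 : sg.reverse[sg.length - 1 - k - 1]'(by simp; omega) = sg[k+1]'hlast := by
        rw [hsrev _ (by omega)]
        congr 1
        omega
      rw [e0, e1]
      have hidx : (0 : Int) + ((k : Nat) : Int) + 1 = ((k + 1 : Nat) : Int) := by push_cast; ring
      rw [hidx, PySem.List.pyGetD_natCast]
      have hget : sg.getD (k + 1) [] = sg[k+1]'hlast := by
        rw [List.getD_eq_getElem?_getD, List.getElem?_eq_getElem hlast]
        simp
      rw [hget]
    · -- the last element: A's (-1)+1 is B's 0
      have hc : ((sg.length : Int) ≤ 0 + ((k : Nat) : Int) + 1) := by omega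
      rw [if_pos hc]
      rw [dif_pos (by omega : sg.length - 1 - k = 0)]
      have e0 : sg.reverse[sg.length - 1 - k]'(by simp; omega) = sg[k]'hn := by
        rw [hsrev _ (by omega)]
        congr 1
        omega
      rw [e0]
      norm_num
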